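-- pv_equiv track=rewrite | github.com/Wyw021214/Smart-Decision-Mini-Project | vrp_ga.py | _decode_hetero
-- ===== SOURCE A (Python) =====
-- from typing import List, Dict, Any, Union, Tuple
--
-- def _decode_hetero(order: List[int],
--                    demands: List[int],
--                    vehicle_caps: List[int]) -> Tuple[List[List[int]], List[int], int]:
--     """
--     Decode a permutation of customers into routes for a heterogeneous fleet.
--
--     - order: list of customers indices (1..n)
--     - demands: demand per node (demands[0] = 0 for depot)
--     - vehicle_caps: list of capacities for each vehicle
--
--     Returns:
--       routes: one list per vehicle (customers served by that vehicle)
--       loads: realized load per vehicle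
--       used_k: number of vehicles actually used (non-empty routes)
--     """
--     k = len(vehicle_caps)
--     routes = [[] for _ in range(k)]
--     loads  = [0  for _ in range(k)]
--
--     v = 0
--     for c in order:
--         d = int(demands[c])
--         # If not the last vehicle, try to respect capacity.
--         if v < k - 1 and loads[v] + d > int(vehicle_caps[v]):
--             v += 1
--         routes[v].append(c)
--         loads[v] += d
--
--     used_k = sum(1 for r in routes if r)
--     return routes, loads, used_k
-- ===== SOURCE B (Python) =====
-- def _decode_hetero(order, demands, vehicle_caps):
--     # Vehicle-by-vehicle decomposition: instead of one pass appending customer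
--     # by customer, each vehicle grabs its whole contiguous block of the
--     # permutation (tracked by an index; the last vehicle takes everything left,
--     # a later vehicle starts with one unconditional customer), and each route
--     # is emitted as one slice of `order`.
--     k = len(vehicle_caps)
--     routes = []
--     loads = []
--     i = 0
--     for j in range(k):
--         start = i
--         if j == k - 1:
--             i = len(order)
--         else:
--             load = 0
--             if j > 0 and i < len(order):
--                 load = int(demands[order[i]])
--                 i += 1
--             cap = int(vehicle_caps[j])
--             while i < len(order):
--                 d = int(demands[order[i]])
--                 if load + d > cap:
--                     break
--                 load += d
--                 i += 1
--         seg = order[start:i]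
--         routes.append(seg)
--         loads.append(sum(int(demands[c]) for c in seg))
--     used_k = sum(1 for r in routes if r)
--     return routes, loads, used_k
-- ===== Notes on version B (the rewrite author's own statement) =====
-- stated objective: alternative
-- what changed: Replaces A's single customer-by-customer pass mutating per-vehicle route/load arrays with a vehicle-by-vehicle decomposition: each vehicle greedily claims one contiguous block of the permutation via a moving index, its route is emitted as one slice of order, and its load is summed from that slice.
import Mathlib
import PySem

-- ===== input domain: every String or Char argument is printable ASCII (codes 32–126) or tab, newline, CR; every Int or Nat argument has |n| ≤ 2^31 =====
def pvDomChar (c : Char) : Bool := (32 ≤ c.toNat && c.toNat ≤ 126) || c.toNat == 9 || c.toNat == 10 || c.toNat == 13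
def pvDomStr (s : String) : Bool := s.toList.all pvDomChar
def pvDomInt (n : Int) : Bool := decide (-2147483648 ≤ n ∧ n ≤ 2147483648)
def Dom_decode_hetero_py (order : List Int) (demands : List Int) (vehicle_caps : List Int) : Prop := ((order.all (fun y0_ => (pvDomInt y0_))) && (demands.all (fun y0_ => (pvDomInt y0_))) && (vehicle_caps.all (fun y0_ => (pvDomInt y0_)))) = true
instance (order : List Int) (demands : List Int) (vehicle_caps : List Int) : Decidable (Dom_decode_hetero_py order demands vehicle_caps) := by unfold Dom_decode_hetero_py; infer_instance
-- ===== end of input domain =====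

-- B reorganises A's single customer-by-customer pass into a vehicle-by-vehicle pass
-- (each vehicle claims one contiguous slice of the permutation): objective 'alternative'.

-- ===== PORT A =====
-- loop body of A's 'for c in order'; state = (routes, loads, v).
-- demands[c] is int(demands[c]) in Python; pyGetD is exact under Pre_ (index in range).
-- loads[v] / vehicle_caps[v] use getD: whenever Python evaluates them, v is in range
-- (v < k, resp. v < k-1), which Pre_ guarantees, so the default is never taken there.
def stepA (k : Nat) (demands : List Int) (vehicle_caps : List Int)
    (st : List (List Int) × List Int × Nat) (c : Int) : List (List Int) × List Int × Nat :=
  let routes := st.1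
  let loads := st.2.1
  let v := st.2.2
  let d := PySem.List.pyGetD demands c 0
  let v := if decide ((v : Int) < (k : Int) - 1) && decide (loads.getD v 0 + d > vehicle_caps.getD v 0)
           then v + 1 else v
  (routes.set v (routes.getD v [] ++ [c]), loads.set v (loads.getD v 0 + d), v)

def decode_hetero_py (order : List Int) (demands : List Int) (vehicle_caps : List Int) :
    List (List Int) × List Int × Int :=
  let k := vehicle_caps.length
  let st := order.foldl (stepA k demands vehicle_caps)
              (List.replicate k [], List.replicate k 0, 0)
  (st.1, st.2.1, (st.1.countP (fun r => !r.isEmpty) : Int))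

-- ===== PORT B =====
-- sum(int(demands[c]) for c in seg)
def segSum (demands : List Int) (seg : List Int) : Int :=
  (seg.map (fun c => PySem.List.pyGetD demands c 0)).sum

-- the inner 'while i < len(order)' loop of Source B: returns the final (i, load)
def bInner (order : List Int) (demands : List Int) (cap : Int) (i : Nat) (load : Int) :
    Nat × Int :=
  if i < order.length then
    let d := PySem.List.pyGetD demands (order.getD i 0) 0
    if load + d > cap then (i, load)
    else bInner order demands cap (i + 1) (load + d)
  else (i, load)
termination_by order.length - i

-- the 'for j in range(k)' loop of Source B; the caps suffix stands for j..k-1 and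
-- 'forced' for 'j > 0'; returns (routes, loads) for those vehicles.
def bOuter (order : List Int) (demands : List Int) (caps : List Int) (forced : Bool)
    (i : Nat) : List (List Int) × List Int :=
  match caps with
  | [] => ([], [])
  | [_] =>  -- j == k - 1: take everything left; seg = order[start:len(order)]
    let seg := PySem.List.slice order (some (i : Int)) (some (order.length : Int))
    ([seg], [segSum demands seg])
  | cap :: c2 :: caps' =>
    let st := if forced ∧ i < order.length
              then (PySem.List.pyGetD demands (order.getD i 0) 0, i + 1)
              else ((0 : Int), i)
    let p := bInner order demands cap st.2 st.1
    let seg := PySem.List.slice order (some (i : Int)) (some (p.1 : Int))  -- order[start:i]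
    let q := bOuter order demands (c2 :: caps') true p.1
    (seg :: q.1, segSum demands seg :: q.2)

def decode_hetero_py_alt (order : List Int) (demands : List Int) (vehicle_caps : List Int) :
    List (List Int) × List Int × Int :=
  let p := bOuter order demands vehicle_caps false 0
  (p.1, p.2, (p.1.countP (fun r => !r.isEmpty) : Int))

-- ===== PRECONDITION & SPEC =====
-- Pre_ excludes exactly the inputs on which A raises: an empty fleet with a
-- non-empty order (IndexError on routes[0]) and customer indices out of range
-- for demands (IndexError on demands[c]).
def Pre_decode_hetero_py (order : List Int) (demands : List Int) (vehicle_caps : List Int) : Prop :=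
  (vehicle_caps = [] → order = []) ∧ ∀ c ∈ order, PySem.Raise.InRange demands.length c

instance (order : List Int) (demands : List Int) (vehicle_caps : List Int) :
    Decidable (Pre_decode_hetero_py order demands vehicle_caps) := by
  unfold Pre_decode_hetero_py; infer_instance

def pvWitness_decode_hetero_py : List Int × List Int × List Int :=
  ([1, 2, 3], [0, 3, 4, 2], [5, 10])

def Spec_decode_hetero_py (order : List Int) (demands : List Int) (vehicle_caps : List Int)
    (out : List (List Int) × List Int × Int) : Prop :=
  out = decode_hetero_py_alt order demands vehicle_caps

instance (order : List Int) (demands : List Int) (vehicle_caps : List Int)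
    (out : List (List Int) × List Int × Int) : Decidable (Spec_decode_hetero_py order demands vehicle_caps out) := by
  unfold Spec_decode_hetero_py; infer_instance

-- ===== CLAIM (what is proved, stated in full; the proofs are below) =====
def Claim_equal_decode_hetero_py : Prop := ∀ (order : List Int) (demands : List Int) (vehicle_caps : List Int), Dom_decode_hetero_py order demands vehicle_caps → Pre_decode_hetero_py order demands vehicle_caps → Spec_decode_hetero_py order demands vehicle_caps (decode_hetero_py order demands vehicle_caps)

-- ===== LEMMAS AND PROOFS =====

-- list-level rendering of Source B's inner loop: (taken segment, remaining customers)
def listInner (demands : List Int) (cap : Int) (load : Int) : List Int → List Int × List Int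
  | [] => ([], [])
  | c :: r =>
    let d := PySem.List.pyGetD demands c 0
    if load + d > cap then ([], c :: r)
    else
      let p := listInner demands cap (load + d) r
      (c :: p.1, p.2)

-- list-level rendering of Source B's outer loop
def listOuter (demands : List Int) (caps : List Int) (forced : Bool) (rest : List Int) :
    List (List Int) × List Int :=
  match caps with
  | [] => ([], [])
  | [_] => ([rest], [segSum demands rest])
  | cap :: c2 :: caps' =>
    let p0 := if forced then
        match rest with
        | [] => (([] : List Int), ([] : List Int))
        | c :: r => ([c], r)
      else ([], rest)
    let p := listInner demands cap (segSum demands p0.1) p0.2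
    let seg := p0.1 ++ p.1
    let q := listOuter demands (c2 :: caps') true p.2
    (seg :: q.1, segSum demands seg :: q.2)

-- continuation semantics of A's fold: current vehicle carries 'cur'/'load',
-- caps is the suffix of capacities for the current and later vehicles.
def contD (demands : List Int) (caps : List Int) (cur : List Int) (load : Int)
    (rest : List Int) : List (List Int) × List Int :=
  match caps with
  | [] => ([], [])
  | [_] => ([cur ++ rest], [load + segSum demands rest])
  | cap :: c2 :: caps' =>
    let p := listInner demands cap load rest
    let q := listOuter demands (c2 :: caps') true p.2
    ((cur ++ p.1) :: q.1, (load + segSum demands p.1) :: q.2)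

theorem segSum_nil (demands : List Int) : segSum demands [] = 0 := rfl

theorem segSum_cons (demands : List Int) (c : Int) (s : List Int) :
    segSum demands (c :: s) = PySem.List.pyGetD demands c 0 + segSum demands s := by
  simp [segSum]

theorem listInner_append (demands : List Int) (cap load : Int) (l : List Int) :
    (listInner demands cap load l).1 ++ (listInner demands cap load l).2 = l := by
  induction l generalizing load with
  | nil => rfl
  | cons c r ih => by_cases h : load + PySem.List.pyGetD demands c 0 > cap <;>
      simp [listInner, h, ih]

theorem bInner_eq (order demands : List Int) (cap : Int) :
    ∀ (i : Nat) (load : Int), i ≤ order.length →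
    bInner order demands cap i load =
      (i + (listInner demands cap load (order.drop i)).1.length,
       load + segSum demands (listInner demands cap load (order.drop i)).1) := by
  intro i load hle
  generalize hl : order.drop i = l
  induction l generalizing i load with
  | nil =>
    have hi : i = order.length := by
      have := congrArg List.length hl
      simp [List.length_drop] at this
      omega
    rw [bInner]
    simp [hi, listInner, segSum_nil]
  | cons c r ih =>
    have hlt : i < order.length := by
      by_contra h
      have : order.drop i = [] := List.drop_eq_nil_of_le (by omega)
      rw [this] at hl; cases hl
    have hc : order.getD i 0 = c := by
      have h0 : (order.drop i)[0]? = some c := by rw [hl]; rfl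
      rw [List.getElem?_drop] at h0
      simp only [Nat.add_zero] at h0
      simp [List.getD_eq_getElem?_getD, h0]
    have hr : order.drop (i + 1) = r := by
      have : (order.drop i).tail = r := by rw [hl]; rfl
      rw [← this, List.tail_drop]
    rw [bInner]
    simp only [if_pos hlt, hc]
    by_cases hcap : load + PySem.List.pyGetD demands c 0 > cap
    · simp [listInner, hcap, segSum_nil]
    · have := ih (i + 1) (load + PySem.List.pyGetD demands c 0) (by omega) hr
      rw [if_neg hcap, this]
      simp only [listInner, if_neg hcap]
      simp [segSum_cons]
      constructor
      · omega
      · ring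

-- order[a:a+n] for Nat bounds
theorem slice_take (order : List Int) (i n : Nat) :
    PySem.List.slice order (some (i : Int)) (some ((i + n : Nat) : Int)) =
      (order.drop i).take n := by
  rw [PySem.List.slice_natCast]
  congr 1
  omega

-- after the inner loop, order[i..] splits as the taken segment ++ the remainder
theorem listInner_drop (demands : List Int) (cap load : Int) (l : List Int) :
    l.drop (listInner demands cap load l).1.length = (listInner demands cap load l).2 := by
  rcases hp : listInner demands cap load l with ⟨seg, rst⟩
  have h : seg ++ rst = l := by
    have := listInner_append demands cap load l
    rw [hp] at this
    exact this
  rw [← h]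
  exact List.drop_left

theorem drop_split (order demands : List Int) (cap load : Int) (j : Nat) :
    order.drop (j + (listInner demands cap load (order.drop j)).1.length) =
      (listInner demands cap load (order.drop j)).2 := by
  rw [← List.drop_drop]
  exact listInner_drop demands cap load (order.drop j)

theorem inner_len_le (order demands : List Int) (cap load : Int) (j : Nat) (hj : j ≤ order.length) :
    j + (listInner demands cap load (order.drop j)).1.length ≤ order.length := by
  have := congrArg List.length (listInner_append demands cap load (order.drop j))
  simp [List.length_drop] at this
  omega

theorem listOuter_nil_rest (demands : List Int) (caps : List Int) (forced : Bool) :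
    listOuter demands caps forced [] =
      (List.replicate caps.length [], List.replicate caps.length 0) := by
  induction caps generalizing forced with
  | nil => rfl
  | cons x t ih =>
    cases t with
    | nil => simp [listOuter, segSum_nil]
    | cons y t' =>
      simp [listOuter, listInner, segSum_nil, List.replicate_succ, ih true]

theorem bOuter_eq (order demands : List Int) :
    ∀ (caps : List Int) (forced : Bool) (i : Nat), i ≤ order.length →
    bOuter order demands caps forced i = listOuter demands caps forced (order.drop i) := by
  intro caps
  induction caps with
  | nil => intro forced i hle; rfl
  | cons x t ih =>
    intro forced i hle
    cases t with
    | nil =>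
      show bOuter order demands [x] forced i = _
      rw [bOuter, listOuter]
      have hsl : PySem.List.slice order (some (i : Int)) (some (order.length : Int)) =
          order.drop i := by
        rw [PySem.List.slice_natCast]
        exact List.take_of_length_le (by simp)
      rw [hsl]
    | cons y t' =>
      show bOuter order demands (x :: y :: t') forced i = _
      rw [bOuter]
      by_cases hfi : forced = true ∧ i < order.length
      · obtain ⟨hf, hi⟩ := hfi
        obtain ⟨c, r, hl⟩ : ∃ c r, order.drop i = c :: r := by
          cases h : order.drop i with
          | nil =>
            have := congrArg List.length h
            simp [List.length_drop] at this
            omega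
          | cons c r => exact ⟨c, r, rfl⟩
        have hc : order.getD i 0 = c := by
          have h0 : (order.drop i)[0]? = some c := by rw [hl]; rfl
          rw [List.getElem?_drop] at h0
          simp only [Nat.add_zero] at h0
          simp [List.getD_eq_getElem?_getD, h0]
        have hr : order.drop (i + 1) = r := by
          have : (order.drop i).tail = r := by rw [hl]; rfl
          rw [← this, List.tail_drop]
        have hst : (if forced ∧ i < order.length
              then (PySem.List.pyGetD demands (order.getD i 0) 0, i + 1)
              else ((0 : Int), i)) = (PySem.List.pyGetD demands c 0, i + 1) := by
          rw [if_pos ⟨by simp [hf], hi⟩, hc]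
        rw [hst]
        have hbe := bInner_eq order demands x (i + 1) (PySem.List.pyGetD demands c 0) (by omega)
        rw [hr] at hbe
        set seg := (listInner demands x (PySem.List.pyGetD demands c 0) r).1 with hseg
        set rst := (listInner demands x (PySem.List.pyGetD demands c 0) r).2 with hrst
        have hsplit : seg ++ rst = r := by rw [hseg, hrst, listInner_append]
        have hlen : i + 1 + seg.length ≤ order.length := by
          have := inner_len_le order demands x (PySem.List.pyGetD demands c 0) (i + 1) (by omega)
          rw [hr] at this
          omega
        have hdrop : order.drop (i + 1 + seg.length) = rst := by
          have := drop_split order demands x (PySem.List.pyGetD demands c 0) (i + 1)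
          rw [hr] at this
          exact this
        have hslice : PySem.List.slice order (some (i : Int)) (some ((i + 1 + seg.length : Nat) : Int)) =
            c :: seg := by
          have : (i + 1 + seg.length) = i + (1 + seg.length) := by omega
          rw [this, slice_take, hl, ← hsplit]
          have h1 : (1 : Nat) + seg.length = (c :: seg).length := by simp; omega
          rw [h1, show c :: (seg ++ rst) = (c :: seg) ++ rst from rfl]
          exact List.take_left
        rw [hbe, hslice, ih true (i + 1 + seg.length) hlen, hdrop, hl]
        rw [listOuter]
        rw [if_pos hf]
        simp [segSum_cons, segSum_nil, ← hseg, ← hrst]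
      · have hst : (if forced ∧ i < order.length
              then (PySem.List.pyGetD demands (order.getD i 0) 0, i + 1)
              else ((0 : Int), i)) = ((0 : Int), i) := by
          rw [if_neg hfi]
        rw [hst]
        have hbe := bInner_eq order demands x i 0 hle
        set seg := (listInner demands x 0 (order.drop i)).1 with hseg
        set rst := (listInner demands x 0 (order.drop i)).2 with hrst
        have hsplit : seg ++ rst = order.drop i := by rw [hseg, hrst, listInner_append]
        have hlen : i + seg.length ≤ order.length :=
          inner_len_le order demands x 0 i hle
        have hdrop : order.drop (i + seg.length) = rst :=
          drop_split order demands x 0 i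
        have hslice : PySem.List.slice order (some (i : Int)) (some ((i + seg.length : Nat) : Int)) =
            seg := by
          rw [slice_take, ← hsplit]
          exact List.take_left
        rw [hbe, hslice, ih true (i + seg.length) hlen, hdrop]
        cases forced with
        | false =>
          simp only [listOuter, Bool.false_eq_true, if_false, segSum_nil, ← hseg, ← hrst]
          simp
        | true =>
          have hnil : order.drop i = [] := by
            have : ¬ i < order.length := by
              intro h; exact hfi ⟨rfl, h⟩
            exact List.drop_eq_nil_of_le (by omega)
          have hseg0 : seg = [] := by
            rw [hnil] at hsplit
            cases hseg' : seg with
            | nil => rfl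
            | cons a b => rw [hseg'] at hsplit; cases hsplit
          have hrst0 : rst = [] := by
            rw [hnil, hseg0] at hsplit
            simpa using hsplit
          rw [hseg0, hrst0, hnil, listOuter_nil_rest, listOuter_nil_rest, segSum_nil]
          simp [List.replicate_succ]


theorem listOuter_false (demands : List Int) (caps : List Int) (rest : List Int) :
    listOuter demands caps false rest = contD demands caps [] 0 rest := by
  match caps with
  | [] => rfl
  | [x] => simp [listOuter, contD]
  | x :: y :: t => simp [listOuter, contD, segSum_nil]

theorem listOuter_forced (demands : List Int) (caps : List Int) (c : Int) (r : List Int) :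
    listOuter demands caps true (c :: r) =
      contD demands caps [c] (PySem.List.pyGetD demands c 0) r := by
  match caps with
  | [] => rfl
  | [x] => simp [listOuter, contD, segSum_cons]
  | x :: y :: t => simp [listOuter, contD, segSum_nil, segSum_cons]

theorem getD_append_len {α : Type} (pre : List α) (x : α) (t : List α) (d : α) :
    (pre ++ x :: t).getD pre.length d = x := by
  induction pre with
  | nil => rfl
  | cons a l ih => rw [List.cons_append, List.length_cons, List.getD_cons_succ, ih]

theorem set_append_len {α : Type} (pre : List α) (x y : α) (t : List α) :
    (pre ++ x :: t).set pre.length y = pre ++ y :: t := by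
  induction pre with
  | nil => rfl
  | cons a l ih => simp [ih]

theorem getD_append_len' {α : Type} (pre : List α) (x : α) (t : List α) (d : α) (n : Nat)
    (h : pre.length = n) : (pre ++ x :: t).getD n d = x := by
  subst h; exact getD_append_len pre x t d

theorem set_append_len' {α : Type} (pre : List α) (x y : α) (t : List α) (n : Nat)
    (h : pre.length = n) : (pre ++ x :: t).set n y = pre ++ y :: t := by
  subst h; exact set_append_len pre x y t

theorem getD_of_drop (l : List Int) (n : Nat) (x : Int) (ts : List Int)
    (h : l.drop n = x :: ts) : l.getD n 0 = x := by
  have h0 : (l.drop n)[0]? = some x := by rw [h]; rfl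
  rw [List.getElem?_drop] at h0
  simp only [Nat.add_zero] at h0
  simp [List.getD_eq_getElem?_getD, h0]

theorem contD_nil_rest (demands : List Int) (caps : List Int) (cur : List Int) (load : Int)
    (h : caps ≠ []) :
    contD demands caps cur load [] =
      (cur :: List.replicate (caps.length - 1) [], load :: List.replicate (caps.length - 1) 0) := by
  match caps with
  | [] => exact absurd rfl h
  | [x] => simp [contD, segSum_nil]
  | x :: y :: t =>
    simp [contD, listInner, segSum_nil, listOuter_nil_rest, List.replicate_succ]

theorem contD_last (demands : List Int) (x : Int) (cur : List Int) (load : Int) (c : Int)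
    (rest : List Int) :
    contD demands [x] cur load (c :: rest) =
      contD demands [x] (cur ++ [c]) (load + PySem.List.pyGetD demands c 0) rest := by
  simp [contD, segSum_cons]
  ring

theorem contD_take (demands : List Int) (x y : Int) (t : List Int) (cur : List Int)
    (load : Int) (c : Int) (rest : List Int)
    (h : ¬ load + PySem.List.pyGetD demands c 0 > x) :
    contD demands (x :: y :: t) cur load (c :: rest) =
      contD demands (x :: y :: t) (cur ++ [c]) (load + PySem.List.pyGetD demands c 0) rest := by
  simp only [contD, listInner, if_neg h, segSum_cons]
  rw [List.append_cons, add_assoc]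

theorem contD_over (demands : List Int) (x y : Int) (t : List Int) (cur : List Int)
    (load : Int) (c : Int) (rest : List Int)
    (h : load + PySem.List.pyGetD demands c 0 > x) :
    contD demands (x :: y :: t) cur load (c :: rest) =
      (cur :: (contD demands (y :: t) [c] (PySem.List.pyGetD demands c 0) rest).1,
       load :: (contD demands (y :: t) [c] (PySem.List.pyGetD demands c 0) rest).2) := by
  simp only [contD, listInner, if_pos h, listOuter_forced, segSum_nil]
  simp

theorem foldA_contD (demands vehicle_caps : List Int) :
    ∀ (rest : List Int) (pre : List (List Int)) (lpre : List Int) (cur : List Int)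
      (load : Int) (capsSuf : List Int),
    vehicle_caps.drop pre.length = capsSuf → capsSuf ≠ [] → lpre.length = pre.length →
    ∃ w, List.foldl (stepA vehicle_caps.length demands vehicle_caps)
        (pre ++ cur :: List.replicate (capsSuf.length - 1) [],
         lpre ++ load :: List.replicate (capsSuf.length - 1) 0, pre.length) rest
      = (pre ++ (contD demands capsSuf cur load rest).1,
         lpre ++ (contD demands capsSuf cur load rest).2, w) := by
  intro rest
  induction rest with
  | nil =>
    intro pre lpre cur load capsSuf hdrop hne hlen
    refine ⟨pre.length, ?_⟩
    rw [List.foldl_nil, contD_nil_rest demands capsSuf cur load hne]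
  | cons c rest ih =>
    intro pre lpre cur load capsSuf hdrop hne hlen
    obtain ⟨x, ts, rfl⟩ : ∃ x ts, capsSuf = x :: ts := by
      cases capsSuf with
      | nil => exact absurd rfl hne
      | cons a b => exact ⟨a, b, rfl⟩
    have hklen : ts.length + 1 = vehicle_caps.length - pre.length := by
      have := congrArg List.length hdrop
      simp [List.length_drop] at this
      omega
    have hcapx : vehicle_caps.getD pre.length 0 = x := getD_of_drop _ _ _ _ hdrop
    simp only [List.length_cons, Nat.add_sub_cancel]
    rw [List.foldl_cons]
    cases ts with
    | nil =>
      -- last vehicle: the capacity test is off, c joins the current route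
      have hk1 : vehicle_caps.length = pre.length + 1 := by
        simp at hklen
        omega
      have hgl : (lpre ++ load :: List.replicate ([] : List Int).length 0).getD pre.length 0
          = load := getD_append_len' lpre load _ 0 pre.length hlen
      have hc1 : decide ((pre.length : Int) < (vehicle_caps.length : Int) - 1) = false := by
        apply decide_eq_false
        omega
      have hstep : stepA vehicle_caps.length demands vehicle_caps
          (pre ++ cur :: List.replicate ([] : List Int).length [],
           lpre ++ load :: List.replicate ([] : List Int).length 0, pre.length) c
          = (pre ++ (cur ++ [c]) :: List.replicate ([] : List Int).length [],
             lpre ++ (load + PySem.List.pyGetD demands c 0) :: List.replicate ([] : List Int).length 0,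
             pre.length) := by
        simp only [stepA, hgl, hcapx, hc1, Bool.false_and, Bool.false_eq_true, if_false]
        rw [getD_append_len' pre cur _ [] pre.length rfl,
            set_append_len' pre cur (cur ++ [c]) _ pre.length rfl,
            set_append_len' lpre load (load + PySem.List.pyGetD demands c 0) _ pre.length hlen]
      rw [hstep]
      have := ih pre lpre (cur ++ [c]) (load + PySem.List.pyGetD demands c 0) [x] hdrop
        (by simp) hlen
      simp only [List.length_cons, List.length_nil, Nat.add_sub_cancel] at this
      rw [contD_last]
      exact this
    | cons y t2 =>
      have hk2 : pre.length + 1 < vehicle_caps.length := by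
        simp at hklen
        omega
      have hgl : (lpre ++ load :: List.replicate (y :: t2).length 0).getD pre.length 0
          = load := getD_append_len' lpre load _ 0 pre.length hlen
      have hc1 : decide ((pre.length : Int) < (vehicle_caps.length : Int) - 1) = true := by
        apply decide_eq_true
        omega
      by_cases hcap : load + PySem.List.pyGetD demands c 0 > x
      · -- overflow: move to the next vehicle, which takes c
        have hc2 : decide (load + PySem.List.pyGetD demands c 0 > x) = true :=
          decide_eq_true hcap
        have hstep : stepA vehicle_caps.length demands vehicle_caps
            (pre ++ cur :: List.replicate (y :: t2).length [],
             lpre ++ load :: List.replicate (y :: t2).length 0, pre.length) c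
            = ((pre ++ [cur]) ++ [c] :: List.replicate t2.length [],
               (lpre ++ [load]) ++ PySem.List.pyGetD demands c 0 :: List.replicate t2.length 0,
               pre.length + 1) := by
          simp only [stepA, hgl, hcapx, hc1, hc2, Bool.and_self, if_true]
          rw [show pre ++ cur :: List.replicate (y :: t2).length []
                = (pre ++ [cur]) ++ [] :: List.replicate t2.length [] by
              simp [List.replicate_succ],
              show lpre ++ load :: List.replicate (y :: t2).length 0
                = (lpre ++ [load]) ++ (0 : Int) :: List.replicate t2.length 0 by
              simp [List.replicate_succ]]
          rw [getD_append_len' (pre ++ [cur]) [] _ [] (pre.length + 1) (by simp),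
              getD_append_len' (lpre ++ [load]) 0 _ 0 (pre.length + 1) (by simp [hlen]),
              set_append_len' (pre ++ [cur]) [] _ _ (pre.length + 1) (by simp),
              set_append_len' (lpre ++ [load]) 0 _ _ (pre.length + 1) (by simp [hlen])]
          simp
        rw [hstep]
        have hdrop2 : vehicle_caps.drop (pre ++ [cur]).length = y :: t2 := by
          have h3 : (vehicle_caps.drop pre.length).tail = y :: t2 := by rw [hdrop]; rfl
          rw [← h3, List.tail_drop]
          simp
        have := ih (pre ++ [cur]) (lpre ++ [load]) [c] (PySem.List.pyGetD demands c 0)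
          (y :: t2) hdrop2 (by simp) (by simp [hlen])
        simp only [List.length_cons, Nat.add_sub_cancel, List.length_append, List.length_nil,
          zero_add] at this
        obtain ⟨w, hw⟩ := this
        refine ⟨w, ?_⟩
        rw [contD_over demands x y t2 cur load c rest hcap]
        rw [hw]
        simp
      · -- c still fits the current vehicle
        have hc2 : decide (load + PySem.List.pyGetD demands c 0 > x) = false :=
          decide_eq_false hcap
        have hstep : stepA vehicle_caps.length demands vehicle_caps
            (pre ++ cur :: List.replicate (y :: t2).length [],
             lpre ++ load :: List.replicate (y :: t2).length 0, pre.length) c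
            = (pre ++ (cur ++ [c]) :: List.replicate (y :: t2).length [],
               lpre ++ (load + PySem.List.pyGetD demands c 0) :: List.replicate (y :: t2).length 0,
               pre.length) := by
          simp only [stepA, hgl, hcapx, hc2, Bool.and_false, Bool.false_eq_true, if_false]
          rw [getD_append_len' pre cur _ [] pre.length rfl,
              set_append_len' pre cur (cur ++ [c]) _ pre.length rfl,
              set_append_len' lpre load (load + PySem.List.pyGetD demands c 0) _ pre.length hlen]
        rw [hstep]
        have := ih pre lpre (cur ++ [c]) (load + PySem.List.pyGetD demands c 0) (x :: y :: t2)
          hdrop (by simp) hlen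
        simp only [List.length_cons, Nat.add_sub_cancel] at this
        rw [contD_take demands x y t2 cur load c rest hcap]
        exact this

-- ===== VERDICT (by name: the statement is the Claim_ definition above) =====
theorem decode_hetero_py_spec : Claim_equal_decode_hetero_py := by
  intro order demands vehicle_caps _ hpre
  unfold Spec_decode_hetero_py
  cases vehicle_caps with
  | nil =>
    have ho : order = [] := hpre.1 rfl
    subst ho
    rfl
  | cons x cs =>
    obtain ⟨w, hw⟩ :=
      foldA_contD demands (x :: cs) order [] [] [] 0 (x :: cs) rfl (by simp) rfl
    simp only [List.nil_append, List.length_nil, List.length_cons, Nat.add_sub_cancel] at hw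
    simp only [decode_hetero_py, decode_hetero_py_alt]
    rw [bOuter_eq order demands (x :: cs) false 0 (by omega), List.drop_zero, listOuter_false]
    simp only [List.length_cons]
    rw [show List.replicate (cs.length + 1) ([] : List Int)
          = ([] : List Int) :: List.replicate cs.length [] from rfl,
        show List.replicate (cs.length + 1) (0 : Int)
          = (0 : Int) :: List.replicate cs.length 0 from rfl]
    rw [hw]
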